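-- pv_equiv track=rewrite | github.com/fsgeek/arbiter | experiments/spike_conflict_detection.py | detect_conflict_heuristic
-- ===== SOURCE A (Python) =====
-- CONFLICT_SIGNALS = [
--     "contradict", "conflict", "inconsistent", "incompatible",
--     "cannot determine which", "ambiguity between",
--     "these facts disagree", "mutually exclusive",
-- ]
--
-- def detect_conflict_heuristic(text: str) -> tuple[bool, str]:
--     """Keyword heuristic -- does the response mention a contradiction?"""
--     lower = text.lower()
--     found = [s for s in CONFLICT_SIGNALS if s in lower]
--     if not found:
--         return False, ""
--     for line in text.split("\n"):
--         for s in found: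
--             if s in line.lower():
--                 return True, line.strip()
--     return True, f"Signals: {', '.join(found)}"
-- ===== SOURCE B (Python) =====
-- CONFLICT_SIGNALS = [
--     "contradict", "conflict", "inconsistent", "incompatible",
--     "cannot determine which", "ambiguity between",
--     "these facts disagree", "mutually exclusive",
-- ]
--
-- def detect_conflict_heuristic(text: str) -> tuple[bool, str]:
--     """Keyword heuristic -- does the response mention a contradiction?"""
--     for line in text.split("\n"):
--         low = line.lower()
--         if any(s in low for s in CONFLICT_SIGNALS):
--             return True, line.strip()
--     return False, ""
-- ===== Notes on version B (the rewrite author's own statement) =====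
-- stated objective: simpler
-- what changed: B replaces A's three passes (whole-text membership scan building `found`, then a rescan of every line against `found`, plus a dead `Signals:` fallback) with one direct pass over the lines returning the first matching line; no signal contains a newline, so a signal occurs in the lowercased text iff it occurs in some lowercased line, making the fallback unreachable and the single pass exact.
import Mathlib
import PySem

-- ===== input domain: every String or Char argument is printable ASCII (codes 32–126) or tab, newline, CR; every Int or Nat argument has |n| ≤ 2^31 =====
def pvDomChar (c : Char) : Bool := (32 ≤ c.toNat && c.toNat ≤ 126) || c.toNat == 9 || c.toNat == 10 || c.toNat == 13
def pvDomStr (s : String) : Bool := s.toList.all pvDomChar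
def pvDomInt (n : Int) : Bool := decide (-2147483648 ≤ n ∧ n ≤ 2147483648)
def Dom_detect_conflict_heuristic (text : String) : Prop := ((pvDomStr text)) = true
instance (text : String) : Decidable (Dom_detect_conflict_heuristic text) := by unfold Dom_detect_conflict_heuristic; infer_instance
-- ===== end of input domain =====

-- B replaces A's whole-text membership pass building `found`, the rescan of every line against
-- `found`, and the (unreachable) `Signals:` fallback with one direct pass over the lines
-- (objective: simpler); the return values agree on every input.

-- ===== PORT A =====
def CONFLICT_SIGNALS : List String :=
  ["contradict", "conflict", "inconsistent", "incompatible",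
   "cannot determine which", "ambiguity between",
   "these facts disagree", "mutually exclusive"]

def detectLoopA (found : List String) : List String → Bool × String
  | [] => (true, "Signals: " ++ PySem.Str.join ", " found)
  | line :: rest =>
      if found.any (fun s => PySem.Str.isIn s (PySem.Str.lower line)) then
        (true, PySem.Str.strip line)
      else detectLoopA found rest

def detect_conflict_heuristic (text : String) : Bool × String :=
  let lower := PySem.Str.lower text
  let found := CONFLICT_SIGNALS.filter (fun s => PySem.Str.isIn s lower)
  if found.isEmpty then (false, "")
  else detectLoopA found ((PySem.Str.split? text "\n").getD [])

-- ===== PORT B =====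
def detectLoopB : List String → Bool × String
  | [] => (false, "")
  | line :: rest =>
      let low := PySem.Str.lower line
      if CONFLICT_SIGNALS.any (fun s => PySem.Str.isIn s low) then
        (true, PySem.Str.strip line)
      else detectLoopB rest

def detect_conflict_heuristic_alt (text : String) : Bool × String :=
  detectLoopB ((PySem.Str.split? text "\n").getD [])


-- ===== PRECONDITION & SPEC =====
def Spec_detect_conflict_heuristic (text : String) (out : Bool × String) : Prop := out = detect_conflict_heuristic_alt text
instance (text : String) (out : Bool × String) : Decidable (Spec_detect_conflict_heuristic text out) := by unfold Spec_detect_conflict_heuristic; infer_instance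

-- ===== CLAIM (what is proved, stated in full; the proofs are below) =====
def Claim_equal_detect_conflict_heuristic : Prop := ∀ (text : String), Dom_detect_conflict_heuristic text → Spec_detect_conflict_heuristic text (detect_conflict_heuristic text)

-- ===== LEMMAS AND PROOFS =====

-- fuel-free model of PySem.Chars.splitOn with sep = ['\n']
def splitModel : List Char → List Char → List (List Char)
  | [], cur => [cur.reverse]
  | c :: rest, cur =>
      if c = '\n' then cur.reverse :: splitModel rest []
      else splitModel rest (c :: cur)

theorem go_eq_model (fuel : Nat) : ∀ (l cur : List Char) (acc : List (List Char)),
    l.length < fuel →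
    PySem.Chars.splitOn.go ['\n'] fuel l cur acc = acc.reverse ++ splitModel l cur := by
  induction fuel with
  | zero => intro l cur acc h; omega
  | succ n ih =>
      intro l cur acc h
      cases l with
      | nil => simp [PySem.Chars.splitOn.go, splitModel]
      | cons c rest =>
          simp only [PySem.Chars.splitOn.go]
          by_cases hc : c = '\n'
          · subst hc
            rw [if_pos (by simp [List.isPrefixOf])]
            simp only [List.length_nil, List.drop_zero, List.length_cons, List.drop_succ_cons]
            rw [ih rest [] (cur.reverse :: acc) (by simp at h; omega)]
            simp [splitModel]
          · rw [if_neg (by simp [List.isPrefixOf, Ne.symm hc])]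
            rw [ih rest (c :: cur) acc (by simp at h; omega)]
            simp [splitModel, hc]

theorem splitOn_newline_eq (cs : List Char) :
    PySem.Chars.splitOn cs ['\n'] = splitModel cs [] := by
  rw [PySem.Chars.splitOn, go_eq_model (cs.length + 1) cs [] [] (by omega)]
  simp

theorem splitModel_ne_nil (l cur : List Char) : splitModel l cur ≠ [] := by
  induction l generalizing cur with
  | nil => simp [splitModel]
  | cons c rest ih => by_cases hc : c = '\n' <;> simp [splitModel, hc, ih]

theorem join_splitModel (l : List Char) : ∀ cur,
    PySem.Chars.join ['\n'] (splitModel l cur) = cur.reverse ++ l := by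
  induction l with
  | nil => intro cur; simp [splitModel, PySem.Chars.join_singleton]
  | cons c rest ih =>
      intro cur
      by_cases hc : c = '\n'
      · subst hc
        rw [show splitModel ('\n' :: rest) cur = cur.reverse :: splitModel rest [] from by
          simp [splitModel]]
        obtain ⟨q, qs, hq⟩ : ∃ q qs, splitModel rest [] = q :: qs := by
          cases h : splitModel rest [] with
          | nil => exact absurd h (splitModel_ne_nil rest [])
          | cons q qs => exact ⟨q, qs, rfl⟩
        rw [hq, PySem.Chars.join_cons_cons, ← hq, ih]
        simp
      · simp only [splitModel, if_neg hc]
        rw [ih (c :: cur)]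
        simp

theorem prefix_split {sub b : List Char} {c : Char} :
    ∀ {a : List Char}, sub <+: a ++ c :: b → c ∉ sub → sub <+: a := by
  induction sub with
  | nil => intro a _ _; exact List.nil_prefix
  | cons s ss ih =>
      intro a h hc
      cases a with
      | nil =>
          exfalso
          have : s = c := by
            have := h
            simp [List.cons_prefix_cons] at this
            exact this.1
          exact hc (by rw [this]; simp)
      | cons x xs =>
          rw [List.cons_append, List.cons_prefix_cons] at h
          rw [List.cons_prefix_cons]
          exact ⟨h.1, ih h.2 (fun hm => hc (List.mem_cons_of_mem _ hm))⟩

theorem infix_split {sub b : List Char} {c : Char} :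
    ∀ {a : List Char}, sub <:+: a ++ c :: b → c ∉ sub → sub <:+: a ∨ sub <:+: b := by
  intro a h hc
  induction a with
  | nil =>
      rcases List.infix_cons_iff.mp h with h' | h'
      · cases sub with
        | nil => exact Or.inl (List.infix_refl _)
        | cons s ss =>
            exfalso
            have : s = c := by
              simp [List.cons_prefix_cons] at h'
              exact h'.1
            exact hc (by rw [this]; simp)
      · exact Or.inr h'
  | cons x xs ih =>
      rw [List.cons_append] at h
      rcases List.infix_cons_iff.mp h with h' | h'
      · exact Or.inl (prefix_split h' hc).isInfix
      · rcases ih h' with h2 | h2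
        · exact Or.inl (h2.trans (List.suffix_cons x xs).isInfix)
        · exact Or.inr h2
theorem lower_join (ps : List (List Char)) :
    PySem.Chars.lower (PySem.Chars.join ['\n'] ps) = PySem.Chars.join ['\n'] (ps.map PySem.Chars.lower) := by
  induction ps with
  | nil => simp [PySem.Chars.join_nil, PySem.Chars.lower]
  | cons p rest ih =>
      cases rest with
      | nil => simp [PySem.Chars.join_singleton]
      | cons q qs =>
          rw [PySem.Chars.join_cons_cons, List.map_cons, List.map_cons, PySem.Chars.join_cons_cons,
            ← List.map_cons]
          have hl : ∀ x y : List Char,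
              PySem.Chars.lower (x ++ y) = PySem.Chars.lower x ++ PySem.Chars.lower y := by
            intro x y; simp [PySem.Chars.lower]
          rw [hl, hl, ih]
          have : PySem.Chars.lower ['\n'] = ['\n'] := by decide
          rw [this]

theorem infix_join_of_mem {p : List Char} {ps : List (List Char)} (hm : p ∈ ps) :
    p <:+: PySem.Chars.join ['\n'] ps := by
  induction ps with
  | nil => simp at hm
  | cons q rest ih =>
      cases rest with
      | nil =>
          rw [List.mem_singleton] at hm
          rw [hm, PySem.Chars.join_singleton]
      | cons r rs =>
          rw [PySem.Chars.join_cons_cons]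
          rcases List.mem_cons.mp hm with h | h
          · rw [h, List.append_assoc]; exact (List.prefix_append _ _).isInfix
          · exact (ih h).trans (List.suffix_append _ _).isInfix

theorem exists_mem_of_infix_join {sub : List Char} (ps : List (List Char)) (hne : ps ≠ [])
    (h : sub <:+: PySem.Chars.join ['\n'] ps) (hn : '\n' ∉ sub) : ∃ p ∈ ps, sub <:+: p := by
  induction ps with
  | nil => exact absurd rfl hne
  | cons q rest ih =>
      cases rest with
      | nil =>
          rw [PySem.Chars.join_singleton] at h
          exact ⟨q, by simp, h⟩
      | cons r rs =>
          rw [PySem.Chars.join_cons_cons, List.append_assoc] at h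
          rcases infix_split h hn with h' | h'
          · exact ⟨q, by simp, h'⟩
          · obtain ⟨p, hp, hsub⟩ := ih (by simp) (by simpa using h')
            exact ⟨p, by simp [hp], hsub⟩

theorem signals_no_newline : ∀ s ∈ CONFLICT_SIGNALS, '\n' ∉ s.toList := by decide

theorem split_getD (text : String) :
    (PySem.Str.split? text "\n").getD [] = (splitModel text.toList []).map String.ofList := by
  have h1 : ("\n" : String).toList = ['\n'] := rfl
  rw [PySem.Str.split?, PySem.Chars.split?, h1]
  simp [splitOn_newline_eq]

theorem isIn_lower_ofList (s : String) (p : List Char) :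
    PySem.Str.isIn s (PySem.Str.lower (String.ofList p)) =
      PySem.Chars.isIn s.toList (PySem.Chars.lower p) := by
  simp [PySem.Str.isIn, PySem.Str.lower]

theorem isIn_lower_text (s text : String) :
    PySem.Str.isIn s (PySem.Str.lower text) =
      PySem.Chars.isIn s.toList (PySem.Chars.lower text.toList) := by
  simp [PySem.Str.isIn, PySem.Str.lower]

-- forward: a signal found in one lowered line is in the whole lowered text
theorem isIn_text_of_isIn_line (text s : String) (p : List Char)
    (hp : p ∈ splitModel text.toList [])
    (h : PySem.Chars.isIn s.toList (PySem.Chars.lower p) = true) :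
    PySem.Chars.isIn s.toList (PySem.Chars.lower text.toList) = true := by
  rw [PySem.Chars.isIn_iff_infix] at h ⊢
  have hjoin : PySem.Chars.join ['\n'] (splitModel text.toList []) = text.toList := by
    simpa using join_splitModel text.toList []
  have hinf : p <:+: text.toList := hjoin ▸ infix_join_of_mem hp
  exact h.trans (by simpa [PySem.Chars.lower] using hinf.map (PySem.Chars.lowerChar))

-- backward: a signal (newline-free) in the lowered text is in some lowered line
theorem exists_line_of_isIn_text (text s : String) (hn : '\n' ∉ s.toList)
    (h : PySem.Chars.isIn s.toList (PySem.Chars.lower text.toList) = true) :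
    ∃ p ∈ splitModel text.toList [], PySem.Chars.isIn s.toList (PySem.Chars.lower p) = true := by
  have hjoin : PySem.Chars.join ['\n'] (splitModel text.toList []) = text.toList := by
    simpa using join_splitModel text.toList []
  rw [PySem.Chars.isIn_iff_infix, ← hjoin, lower_join] at h
  obtain ⟨q, hq, hsub⟩ := exists_mem_of_infix_join _ (by simp [splitModel_ne_nil]) h hn
  obtain ⟨p, hp, rfl⟩ := List.mem_map.mp hq
  exact ⟨p, hp, (PySem.Chars.isIn_iff_infix _ _).mpr hsub⟩

theorem detectLoopB_of_none (lines : List String)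
    (h : ∀ line ∈ lines, (CONFLICT_SIGNALS.any fun s => PySem.Str.isIn s (PySem.Str.lower line)) = false) :
    detectLoopB lines = (false, "") := by
  induction lines with
  | nil => rfl
  | cons line rest ih =>
      rw [detectLoopB, h line (by simp)]
      simp only [Bool.false_eq_true, if_false]
      exact ih (fun l hl => h l (by simp [hl]))

theorem detectLoopA_eq_B (found lines : List String)
    (hAgree : ∀ line ∈ lines,
      (found.any fun s => PySem.Str.isIn s (PySem.Str.lower line)) =
      (CONFLICT_SIGNALS.any fun s => PySem.Str.isIn s (PySem.Str.lower line)))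
    (hEx : ∃ line ∈ lines, (CONFLICT_SIGNALS.any fun s => PySem.Str.isIn s (PySem.Str.lower line)) = true) :
    detectLoopA found lines = detectLoopB lines := by
  induction lines with
  | nil => obtain ⟨_, h, _⟩ := hEx; simp at h
  | cons line rest ih =>
      rw [detectLoopA, detectLoopB, hAgree line (by simp)]
      by_cases hm : (CONFLICT_SIGNALS.any fun s => PySem.Str.isIn s (PySem.Str.lower line)) = true
      · rw [if_pos hm, if_pos hm]
      · rw [if_neg hm, if_neg hm]
        refine ih (fun l hl => hAgree l (by simp [hl])) ?_
        obtain ⟨l, hl, hml⟩ := hEx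
        rcases List.mem_cons.mp hl with rfl | hl'
        · exact absurd hml hm
        · exact ⟨l, hl', hml⟩

theorem ports_agree (text : String) : detect_conflict_heuristic text = detect_conflict_heuristic_alt text := by
  rw [detect_conflict_heuristic, detect_conflict_heuristic_alt, split_getD]
  by_cases hf : (CONFLICT_SIGNALS.filter fun s => PySem.Str.isIn s (PySem.Str.lower text)).isEmpty = true
  · rw [if_pos hf]
    rw [List.isEmpty_iff, List.filter_eq_nil_iff] at hf
    refine (detectLoopB_of_none _ ?_).symm
    intro line hline
    obtain ⟨p, hp, rfl⟩ := List.mem_map.mp hline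
    rw [List.any_eq_false]
    intro s hs
    rw [isIn_lower_ofList]
    intro hcon
    exact hf s hs (by rw [isIn_lower_text]; exact isIn_text_of_isIn_line text s p hp hcon)
  · rw [if_neg hf]
    refine detectLoopA_eq_B _ _ ?_ ?_
    · intro line hline
      obtain ⟨p, hp, rfl⟩ := List.mem_map.mp hline
      rw [List.any_filter]
      refine List.any_congr rfl (fun s => ?_)
      by_cases hsl : PySem.Str.isIn s (PySem.Str.lower (String.ofList p)) = true
      · rw [hsl, Bool.and_true]
        rw [isIn_lower_ofList] at hsl
        rw [isIn_lower_text]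
        simp [isIn_text_of_isIn_line text s p hp hsl]
      · rw [Bool.not_eq_true] at hsl
        rw [hsl, Bool.and_false]
    · have hne : (CONFLICT_SIGNALS.filter fun s => PySem.Str.isIn s (PySem.Str.lower text)) ≠ [] :=
        fun hnil => hf (by rw [hnil]; rfl)
      obtain ⟨s, hsf⟩ := List.exists_mem_of_ne_nil _ hne
      rw [List.mem_filter] at hsf
      obtain ⟨hs, hq⟩ := hsf
      rw [isIn_lower_text] at hq
      obtain ⟨p, hp, hline⟩ := exists_line_of_isIn_text text s (signals_no_newline s hs) hq
      refine ⟨String.ofList p, List.mem_map_of_mem hp, ?_⟩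
      rw [List.any_eq_true]
      exact ⟨s, hs, by rw [isIn_lower_ofList]; exact hline⟩

-- ===== VERDICT (by name: the statement is the Claim_ definition above) =====
theorem detect_conflict_heuristic_spec : Claim_equal_detect_conflict_heuristic := by
  intro text _
  unfold Spec_detect_conflict_heuristic
  exact ports_agree text
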